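-- pv_equiv track=rewrite | github.com/n-o-t-mugen/CIBIL_WEB | cibil/services/extractor.py | _filter_latest_month_enquiries
-- ===== SOURCE A (Python) =====
-- from collections import defaultdict
--
-- def _filter_latest_month_enquiries(all_enquiries):
--     """Filter to get ONLY enquiries from the latest month"""
--     if not all_enquiries:
--         return []
--
--     month_data = defaultdict(list)
--     for enquiry in all_enquiries:
--         parsed_date = enquiry['parsed_date']
--         if parsed_date:
--             year_month = parsed_date[:7]
--             month_data[year_month].append(enquiry)
--
--     if not month_data:
--         return []
--
--     latest_month = max(month_data.keys())
--     return month_data[latest_month]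
-- ===== SOURCE B (Python) =====
-- def _ym(enquiry):
--     pd = enquiry['parsed_date']
--     return pd[:7] if pd else None
--
-- def _filter_latest_month_enquiries(all_enquiries):
--     """Filter to get ONLY enquiries from the latest month"""
--     months = [ym for ym in map(_ym, all_enquiries) if ym is not None]
--     if not months:
--         return []
--     latest = max(months)
--     return [e for e in all_enquiries if _ym(e) == latest]
-- ===== Notes on version B (the rewrite author's own statement) =====
-- stated objective: simpler
-- what changed: Replaced the defaultdict grouping plus max-over-keys lookup by a find-max-then-filter decomposition: one pass collects the year-month of each dated enquiry, max picks the latest, a filter returns its enquiries; no dict is built.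
import Mathlib
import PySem

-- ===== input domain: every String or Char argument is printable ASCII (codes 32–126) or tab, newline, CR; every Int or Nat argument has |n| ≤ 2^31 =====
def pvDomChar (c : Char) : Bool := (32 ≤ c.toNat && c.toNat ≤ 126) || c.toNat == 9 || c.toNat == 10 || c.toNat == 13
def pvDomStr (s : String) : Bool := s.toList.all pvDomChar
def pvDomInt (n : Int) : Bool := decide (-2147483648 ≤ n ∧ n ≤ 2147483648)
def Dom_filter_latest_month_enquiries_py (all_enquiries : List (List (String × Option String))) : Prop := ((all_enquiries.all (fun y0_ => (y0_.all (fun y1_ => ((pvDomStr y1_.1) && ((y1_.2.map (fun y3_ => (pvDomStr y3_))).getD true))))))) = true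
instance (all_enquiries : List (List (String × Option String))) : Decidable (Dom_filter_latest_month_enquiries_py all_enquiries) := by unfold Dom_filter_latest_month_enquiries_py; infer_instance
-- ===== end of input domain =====

-- B replaces A's defaultdict grouping + max-over-keys lookup by find-max-then-filter (simpler decomposition, no dict).


-- ===== PORT A =====
-- literal transliteration: defaultdict(list) grouping by parsed_date[:7], then max over keys.
-- enquiry['parsed_date'] is ported as Dict.getD … none; Pre_ restricts to inputs where the key
-- is present, so the default is never consulted (Python raises KeyError otherwise).
def filter_latest_month_enquiries_py (all_enquiries : List (List (String × Option String))) : List (List (String × Option String)) :=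
  if all_enquiries = [] then []
  else
    let month_data : PySem.Dict String (List (List (String × Option String))) :=
      all_enquiries.foldl (fun d enquiry =>
        match PySem.Dict.getD (PySem.Dict.mk enquiry) "parsed_date" none with
        | some parsed_date =>
            if parsed_date ≠ "" then
              d.modify (PySem.Str.slice parsed_date none (some 7)) [] (· ++ [enquiry])
            else d
        | none => d) PySem.Dict.empty
    if month_data.items = [] then []
    else
      match PySem.List.max? month_data.keys (fun s => s) with
      | some latest_month => month_data.getD latest_month []
      | none => []

-- ===== PORT B =====
-- _ym: the year-month of an enquiry, or none when parsed_date is missing-falsy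
def pvYm (enquiry : List (String × Option String)) : Option String :=
  match PySem.Dict.getD (PySem.Dict.mk enquiry) "parsed_date" none with
  | some pd => if pd ≠ "" then some (PySem.Str.slice pd none (some 7)) else none
  | none => none

def filter_latest_month_enquiries_py_alt (all_enquiries : List (List (String × Option String))) : List (List (String × Option String)) :=
  let months := all_enquiries.filterMap pvYm
  if months = [] then []
  else
    match PySem.List.max? months (fun s => s) with
    | some latest => all_enquiries.filter (fun e => pvYm e == some latest)
    | none => []

-- ===== PRECONDITION & SPEC =====
-- Pre_ excludes exactly the inputs where some enquiry lacks the key 'parsed_date': there the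
-- Python A (and B) raise KeyError.
def Pre_filter_latest_month_enquiries_py (all_enquiries : List (List (String × Option String))) : Prop :=
  ∀ e ∈ all_enquiries, (PySem.Dict.mk e).contains "parsed_date" = true
instance (all_enquiries : List (List (String × Option String))) : Decidable (Pre_filter_latest_month_enquiries_py all_enquiries) := by unfold Pre_filter_latest_month_enquiries_py; infer_instance

def pvWitness_filter_latest_month_enquiries_py : (List (List (String × Option String))) :=
  [[("parsed_date", some "2024-05-13")], [("parsed_date", some "2024-06-01")], [("parsed_date", none)]]

def Spec_filter_latest_month_enquiries_py (all_enquiries : List (List (String × Option String))) (out : List (List (String × Option String))) : Prop := out = filter_latest_month_enquiries_py_alt all_enquiries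
instance (all_enquiries : List (List (String × Option String))) (out : List (List (String × Option String))) : Decidable (Spec_filter_latest_month_enquiries_py all_enquiries out) := by unfold Spec_filter_latest_month_enquiries_py; infer_instance

-- ===== CLAIM (what is proved, stated in full; the proofs are below) =====
def Claim_equal_filter_latest_month_enquiries_py : Prop := ∀ (all_enquiries : List (List (String × Option String))), Dom_filter_latest_month_enquiries_py all_enquiries → Pre_filter_latest_month_enquiries_py all_enquiries → Spec_filter_latest_month_enquiries_py all_enquiries (filter_latest_month_enquiries_py all_enquiries)

-- ===== LEMMAS AND PROOFS =====

-- the pair (year-month, enquiry) appended by A's loop body, as an Option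
def pvPair? (e : List (String × Option String)) : Option (String × List (String × Option String)) :=
  (pvYm e).map (fun ym => (ym, e))

-- A's fold is the modify-append fold over the valid (year-month, enquiry) pairs
theorem foldA_eq (xs : List (List (String × Option String)))
    (d : PySem.Dict String (List (List (String × Option String)))) :
    xs.foldl (fun d enquiry =>
        match PySem.Dict.getD (PySem.Dict.mk enquiry) "parsed_date" none with
        | some parsed_date =>
            if parsed_date ≠ "" then
              d.modify (PySem.Str.slice parsed_date none (some 7)) [] (· ++ [enquiry])
            else d
        | none => d) d
    = (xs.filterMap pvPair?).foldl (fun d p => d.modify p.1 [] (· ++ [p.2])) d := by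
  induction xs generalizing d with
  | nil => rfl
  | cons e t ih =>
      cases h : PySem.Dict.getD (PySem.Dict.mk e) "parsed_date" none with
      | none =>
          have hp : pvPair? e = none := by simp [pvPair?, pvYm, h]
          simp only [List.foldl_cons, List.filterMap_cons, hp, h]
          exact ih d
      | some pd =>
          by_cases hpd : pd = ""
          · have hp : pvPair? e = none := by simp [pvPair?, pvYm, h, hpd]
            simp only [List.foldl_cons, List.filterMap_cons, hp, h, hpd, ne_eq,
              not_true_eq_false, if_false]
            exact ih d
          · have hp : pvPair? e = some (PySem.Str.slice pd none (some 7), e) := by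
              simp [pvPair?, pvYm, h, hpd]
            simp only [List.foldl_cons, List.filterMap_cons, hp, h, hpd, ne_eq,
              not_false_eq_true, if_true]
            exact ih _

theorem contains_foldl_modify (ps : List (String × List (String × Option String)))
    (d : PySem.Dict String (List (List (String × Option String)))) (k : String) :
    (ps.foldl (fun d p => d.modify p.1 [] (· ++ [p.2])) d).contains k
      = (ps.any (fun p => k == p.1) || d.contains k) := by
  induction ps generalizing d with
  | nil => simp
  | cons p t ih =>
      simp only [List.foldl_cons, List.any_cons, ih, PySem.Dict.contains_modify]
      cases h : (k == p.1) <;> simp_all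

theorem map_fst_filterMap_pvPair? (xs : List (List (String × Option String))) :
    (xs.filterMap pvPair?).map (·.1) = xs.filterMap pvYm := by
  induction xs with
  | nil => rfl
  | cons e t ih =>
      cases h : pvYm e with
      | none =>
          have hp : pvPair? e = none := by simp [pvPair?, h]
          simp only [List.filterMap_cons, hp, h, ih]
      | some ym =>
          have hp : pvPair? e = some (ym, e) := by simp [pvPair?, h]
          simp only [List.filterMap_cons, hp, h, List.map_cons, ih]

theorem mem_months_iff (xs : List (List (String × Option String))) (k : String) :
    k ∈ xs.filterMap pvYm ↔
      ((xs.filterMap pvPair?).foldl (fun d p => d.modify p.1 [] (· ++ [p.2]))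
        PySem.Dict.empty).contains k = true := by
  rw [contains_foldl_modify, ← map_fst_filterMap_pvPair?]
  simp only [PySem.Dict.contains_empty, Bool.or_false, List.any_eq_true, List.mem_map,
    beq_iff_eq]
  constructor
  · rintro ⟨p, hp, rfl⟩
    exact ⟨p, hp, rfl⟩
  · rintro ⟨p, hp, rfl⟩
    exact ⟨p, hp, rfl⟩

theorem getD_group (xs : List (List (String × Option String))) (c : String) :
    ((xs.filterMap pvPair?).foldl (fun d p => d.modify p.1 [] (· ++ [p.2]))
        PySem.Dict.empty).getD c []
      = xs.filter (fun e => pvYm e == some c) := by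
  rw [PySem.Dict.getD_foldl_modify_append]
  simp only [PySem.Dict.getD_empty, List.nil_append]
  induction xs with
  | nil => rfl
  | cons e t ih =>
      cases h : pvYm e with
      | none =>
          have hp : pvPair? e = none := by simp [pvPair?, h]
          simp only [List.filterMap_cons, List.filter_cons, hp, h]
          simpa using ih
      | some ym =>
          have hp : pvPair? e = some (ym, e) := by simp [pvPair?, h]
          by_cases hc : ym = c
          · simp only [List.filterMap_cons, List.filter_cons, hp, h, hc]
            simp [ih]
          · simp only [List.filterMap_cons, List.filter_cons, hp, h]
            simp [hc, ih]

-- max? with the identity key returns the same string on any two lists with the same members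
theorem max?_id_eq_of_mem_iff (l₁ l₂ : List String)
    (h : ∀ k, k ∈ l₁ ↔ k ∈ l₂) :
    PySem.List.max? l₁ (fun s => s) = PySem.List.max? l₂ (fun s => s) := by
  cases h₁ : PySem.List.max? l₁ (fun s => s) with
  | none =>
      rw [PySem.List.max?_eq_none_iff] at h₁
      subst h₁
      cases h₂ : PySem.List.max? l₂ (fun s => s) with
      | none => rfl
      | some m =>
          have := PySem.List.max?_mem h₂
          rw [← h] at this
          simp at this
  | some m =>
      cases h₂ : PySem.List.max? l₂ (fun s => s) with
      | none =>
          rw [PySem.List.max?_eq_none_iff] at h₂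
          subst h₂
          have := PySem.List.max?_mem h₁
          rw [h] at this
          simp at this
      | some m' =>
          have hm : m ∈ l₂ := (h m).mp (PySem.List.max?_mem h₁)
          have hm' : m' ∈ l₁ := (h m').mpr (PySem.List.max?_mem h₂)
          have h1 : m' ≤ m := PySem.List.max?_isMax h₁ m' hm'
          have h2 : m ≤ m' := PySem.List.max?_isMax h₂ m hm
          exact congrArg some (le_antisymm h2 h1)

theorem keys_mem_iff_contains {ν : Type} (d : PySem.Dict String ν) (k : String) :
    k ∈ d.keys ↔ d.contains k = true := by
  rw [PySem.Dict.contains_eq_decide_mem_keys]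
  simp

-- ===== VERDICT (by name: the statement is the Claim_ definition above) =====
theorem filter_latest_month_enquiries_py_spec : Claim_equal_filter_latest_month_enquiries_py := by
  intro xs _ _
  show filter_latest_month_enquiries_py xs = filter_latest_month_enquiries_py_alt xs
  unfold filter_latest_month_enquiries_py filter_latest_month_enquiries_py_alt
  rw [foldA_eq]
  set D := (xs.filterMap pvPair?).foldl (fun d p => d.modify p.1 [] (· ++ [p.2]))
    PySem.Dict.empty with hD
  have hmem : ∀ k, k ∈ D.keys ↔ k ∈ xs.filterMap pvYm := by
    intro k
    rw [keys_mem_iff_contains, mem_months_iff]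
  have hmax : PySem.List.max? D.keys (fun s => s)
      = PySem.List.max? (xs.filterMap pvYm) (fun s => s) :=
    max?_id_eq_of_mem_iff _ _ hmem
  by_cases hnil : xs = []
  · subst hnil; rfl
  · simp only [hnil, if_false]
    by_cases hitems : D.items = []
    · have hkeys : D.keys = [] := by
        show D.items.map (·.1) = []
        simp [hitems]
      have hmonths : xs.filterMap pvYm = [] := by
        rw [List.eq_nil_iff_forall_not_mem]
        intro k hk
        have := (hmem k).mpr hk
        simp [hkeys] at this
      simp [hitems, hmonths]
    · have hkeys : D.keys ≠ [] := by
        intro h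
        exact hitems (List.map_eq_nil_iff.mp h)
      have hmonths : xs.filterMap pvYm ≠ [] := by
        intro h
        rcases List.exists_mem_of_ne_nil _ hkeys with ⟨k, hk⟩
        have := (hmem k).mp hk
        simp [h] at this
      simp only [hitems, if_false, hmonths]
      rw [hmax]
      cases h : PySem.List.max? (xs.filterMap pvYm) (fun s => s) with
      | none => rfl
      | some m => exact getD_group xs m
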